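-- pv_equiv track=rewrite | github.com/aleattene/python_challenges | edabit/switch_on_the_gravity/solution_switch_on_the_gravity.py | switch_gravity_on
-- ===== SOURCE A (Python) =====
-- def switch_gravity_on(lst):
--     for row in range(len(lst)-2, -1, -1):
--         for col in range(len(lst[row])-1, -1, -1):
--             if lst[row][col] == '#':
--                 lst[row][col] = "-"
--                 last_row = len(lst)-1
--                 while True:
--                     if lst[last_row][col] != "#":
--                         lst[last_row][col] = "#"
--                         break
--                     else:
--                         last_row -= 1
--     return lst
-- ===== SOURCE B (Python) =====
-- def switch_gravity_on(lst):
--     if not lst: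
--         return lst
--     n = len(lst)
--     for col in range(len(lst[0])):
--         k = sum(1 for r in range(n) if lst[r][col] == '#')
--         for r in range(n):
--             if r >= n - k:
--                 lst[r][col] = '#'
--             elif lst[r][col] == '#':
--                 lst[r][col] = '-'
--     return lst
-- ===== Notes on version B (the rewrite author's own statement) =====
-- stated objective: alternative
-- what changed: Instead of scanning rows bottom-up and dropping each '#' with an inner while-loop cascade, B counts the '#' per column in one pass and rewrites the column directly (bottom k cells '#', former '#' cells above become '-').
-- outside the precondition, e.g. on switch_gravity_on([['x', 'x'], []]): A returns [['x', 'x'], []], B raises IndexError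
import Mathlib
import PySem

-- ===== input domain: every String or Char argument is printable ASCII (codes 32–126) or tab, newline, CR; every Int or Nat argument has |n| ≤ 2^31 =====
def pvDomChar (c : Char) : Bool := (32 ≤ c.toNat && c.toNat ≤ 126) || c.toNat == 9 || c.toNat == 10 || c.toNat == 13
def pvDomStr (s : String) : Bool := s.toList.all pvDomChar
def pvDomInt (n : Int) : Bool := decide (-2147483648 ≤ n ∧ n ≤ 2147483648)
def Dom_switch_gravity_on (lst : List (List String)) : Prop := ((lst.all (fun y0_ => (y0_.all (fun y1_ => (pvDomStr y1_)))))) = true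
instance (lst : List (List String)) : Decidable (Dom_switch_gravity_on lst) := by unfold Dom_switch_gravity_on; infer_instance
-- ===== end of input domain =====

-- B counts the '#' per column once and rewrites each column directly (bottom-fill), replacing A's
-- per-'#' drop cascade with a single counting pass per column. Both Pythons mutate lst in place and
-- return it; the equivalence proved is about the returned value (the in-place effect is the same grid).

-- ===== PORT A =====
-- lst[i][j] read/write; under Pre_ (rectangular grid) every access A performs is in range,
-- so the getD defaults are never the result of an out-of-range Python access.
def pvGet2 (g : List (List String)) (i j : Nat) : String := (g.getD i []).getD j ""

def pvSet2 (g : List (List String)) (i j : Nat) (v : String) : List (List String) :=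
  g.set i ((g.getD i []).set j v)

-- the `while True` loop: last_row starts at len(lst)-1 and strictly decreases, so it is a
-- structural recursion on last_row; under Pre_ it always stops at the freshly written "-"
-- before reaching row 0's test failure (the `| 0 => else g` branch is unreachable fuel-out).
def pvDrop (g : List (List String)) (c : Nat) : Nat → List (List String)
  | 0 => if pvGet2 g 0 c ≠ "#" then pvSet2 g 0 c "#" else g
  | lr+1 => if pvGet2 g (lr+1) c ≠ "#" then pvSet2 g (lr+1) c "#" else pvDrop g c lr

-- for col in range(len(lst[row])-1, -1, -1): fuel = col+1, processes col then recurses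
def pvInner (r n : Nat) : List (List String) → Nat → List (List String)
  | g, 0 => g
  | g, c+1 =>
      pvInner r n (if pvGet2 g r c = "#" then pvDrop (pvSet2 g r c "-") c (n-1) else g) c

-- for row in range(len(lst)-2, -1, -1): fuel = row+1, processes row then recurses
def pvOuter (n : Nat) : List (List String) → Nat → List (List String)
  | g, 0 => g
  | g, r+1 => pvOuter n (pvInner r n g ((g.getD r []).length)) r

def switch_gravity_on (lst : List (List String)) : List (List String) :=
  pvOuter lst.length lst (lst.length - 1)

-- ===== PORT B =====
-- one column of Source B's body: count k, then the fill loop over all rows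
def pvColFix (n : Nat) (g : List (List String)) (c : Nat) : List (List String) :=
  let k := (List.range n).countP (fun r => pvGet2 g r c = "#")
  (List.range n).foldl
    (fun h r =>
      if n - k ≤ r then pvSet2 h r c "#"
      else if pvGet2 h r c = "#" then pvSet2 h r c "-" else h) g

def switch_gravity_on_alt (lst : List (List String)) : List (List String) :=
  if lst = [] then lst
  else (List.range ((lst.getD 0 []).length)).foldl (pvColFix lst.length) lst

-- ===== PRECONDITION & SPEC =====
-- Pre_ admits every rectangular grid (the task's natural domain, first disjunct) and, of the
-- ragged grids, those that are trivial for gravity: no '#' above the last row and row 0 no longer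
-- than any other row (second disjunct; there both programs return the input unchanged).  Other
-- ragged grids are excluded: on them A raises IndexError whenever a '#' must fall past a shorter
-- row, B's column count raises IndexError when a row is shorter than row 0, and where both happen
-- to return, a 'column' of a ragged grid is ill-defined and the two readings legitimately differ
-- (see claim.json cites).
def Pre_switch_gravity_on (lst : List (List String)) : Prop :=
  (∀ row ∈ lst, row.length = (lst.headD []).length) ∨
  ((∀ row ∈ lst, (lst.headD []).length ≤ row.length) ∧
   ∀ i < lst.length - 1, "#" ∉ lst.getD i [])
instance (lst : List (List String)) : Decidable (Pre_switch_gravity_on lst) := by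
  unfold Pre_switch_gravity_on; infer_instance

def pvWitness_switch_gravity_on : List (List String) :=
  [["#", "."], [".", "-"], ["#", "#"]]

def Spec_switch_gravity_on (lst : List (List String)) (out : List (List String)) : Prop := out = switch_gravity_on_alt lst
instance (lst : List (List String)) (out : List (List String)) : Decidable (Spec_switch_gravity_on lst out) := by unfold Spec_switch_gravity_on; infer_instance

-- ===== CLAIM (what is proved, stated in full; the proofs are below) =====
def Claim_equal_switch_gravity_on : Prop := ∀ (lst : List (List String)), Dom_switch_gravity_on lst → Pre_switch_gravity_on lst → Spec_switch_gravity_on lst (switch_gravity_on lst)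

-- ===== LEMMAS AND PROOFS =====

-- shape: n rows, each of length L
def GShape (g : List (List String)) (n L : Nat) : Prop :=
  g.length = n ∧ ∀ row ∈ g, row.length = L

-- column c of the grid, as a list of length g.length
def colOf (g : List (List String)) (c : Nat) : List String :=
  g.map (fun row => row.getD c "")

-- ---- column-level versions of A's loops ----
def cdrop (xs : List String) : Nat → List String
  | 0 => if xs.getD 0 "" ≠ "#" then xs.set 0 "#" else xs
  | lr+1 => if xs.getD (lr+1) "" ≠ "#" then xs.set (lr+1) "#" else cdrop xs lr

def cstep (n : Nat) (xs : List String) (r : Nat) : List String :=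
  if xs.getD r "" = "#" then cdrop (xs.set r "-") (n-1) else xs

def couter (n : Nat) : List String → Nat → List String
  | xs, 0 => xs
  | xs, r+1 => couter n (cstep n xs r) r

-- the common column result: k = number of '#', bottom k cells '#', '#' above becomes '-'
def chash (xs : List String) : Nat := xs.countP (fun v => decide (v = "#"))

def cspec (xs : List String) : List String :=
  xs.mapIdx (fun i v => if xs.length - chash xs ≤ i then "#" else if v = "#" then "-" else v)

-- basic bridges
theorem pvGet2_colOf (g : List (List String)) (i c : Nat) :
    pvGet2 g i c = (colOf g c).getD i "" := by
  simp only [pvGet2, colOf, List.getD_eq_getElem?_getD, List.getElem?_map]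
  cases h : g[i]? <;> simp

theorem colOf_set2_self (g : List (List String)) (i c : Nat) (v : String)
    (h : c < (g.getD i []).length ∨ g.length ≤ i) :
    colOf (pvSet2 g i c v) c = (colOf g c).set i v := by
  rcases h with h | h
  · simp only [colOf, pvSet2, List.map_set]
    congr 1
    have h' : c < (g[i]?.getD []).length := by simpa [List.getD_eq_getElem?_getD] using h
    simp [List.getD_eq_getElem?_getD, List.getElem?_set_self h']
  · rw [pvSet2, List.set_eq_of_length_le (by omega), List.set_eq_of_length_le (by simp [colOf]; omega)]

theorem colOf_set2_ne (g : List (List String)) (i c c' : Nat) (v : String) (h : c' ≠ c) :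
    colOf (pvSet2 g i c v) c' = colOf g c' := by
  apply List.ext_getElem?
  intro j
  by_cases hj : j = i
  · subst hj
    by_cases hi : j < g.length
    · rw [colOf, colOf, pvSet2, List.map_set]
      rw [List.getElem?_set_self (by simpa), List.getElem?_map, List.getElem?_eq_getElem hi]
      simp only [Option.map_some]
      congr 1
      rw [List.getD_eq_getElem g [] hi]
      simp [List.getD_eq_getElem?_getD, List.getElem?_set_ne (show c ≠ c' by omega)]
    · rw [pvSet2, List.set_eq_of_length_le (by omega)]
  · rw [colOf, colOf, pvSet2, List.map_set, List.getElem?_set_ne (by omega)]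

theorem shape_set2 (g : List (List String)) (i c : Nat) (v : String) {n L : Nat}
    (h : GShape g n L) : GShape (pvSet2 g i c v) n L := by
  by_cases hi : i < g.length
  · refine ⟨by simpa [pvSet2] using h.1, ?_⟩
    intro row hrow
    rcases List.mem_or_eq_of_mem_set hrow with hm | he
    · exact h.2 _ hm
    · subst he
      rw [List.length_set, List.getD_eq_getElem g [] hi]
      exact h.2 _ (List.getElem_mem hi)
  · rw [pvSet2, List.set_eq_of_length_le (by omega)]
    exact h

theorem set2_ok (g : List (List String)) {n L : Nat} (hg : GShape g n L) (c i : Nat)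
    (hc : c < L) : c < (g.getD i []).length ∨ g.length ≤ i := by
  by_cases hi : i < g.length
  · left
    rw [List.getD_eq_getElem g [] hi, hg.2 _ (List.getElem_mem hi)]
    exact hc
  · right; omega

theorem length_colOf (g : List (List String)) (c : Nat) :
    (colOf g c).length = g.length := by
  simp [colOf]

-- A-side bridges
theorem pvDrop_bridge (c L : Nat) (hc : c < L) :
    ∀ (lr : Nat) (g : List (List String)) {n : Nat}, GShape g n L →
      GShape (pvDrop g c lr) n L ∧
      colOf (pvDrop g c lr) c = cdrop (colOf g c) lr ∧
      ∀ c', c' ≠ c → colOf (pvDrop g c lr) c' = colOf g c' := by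
  intro lr
  induction lr with
  | zero =>
    intro g n hg
    by_cases h : (colOf g c).getD 0 "" = "#" <;>
      simp only [pvDrop, cdrop, pvGet2_colOf, h, if_pos, if_neg, ne_eq, not_true_eq_false,
        not_false_eq_true, ite_true, ite_false]
    · exact ⟨hg, trivial, fun _ _ => trivial⟩
    · exact ⟨shape_set2 _ _ _ _ hg, colOf_set2_self _ _ _ _ (set2_ok g hg c 0 hc),
        fun c' hne => colOf_set2_ne _ _ _ _ _ hne⟩
  | succ lr ih =>
    intro g n hg
    by_cases h : (colOf g c).getD (lr+1) "" = "#" <;>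
      simp only [pvDrop, cdrop, pvGet2_colOf, h, if_pos, if_neg, ne_eq, not_true_eq_false,
        not_false_eq_true, ite_true, ite_false]
    · exact ih g hg
    · exact ⟨shape_set2 _ _ _ _ hg, colOf_set2_self _ _ _ _ (set2_ok g hg c (lr+1) hc),
        fun c' hne => colOf_set2_ne _ _ _ _ _ hne⟩

theorem pvInner_bridge (r n L : Nat) :
    ∀ (fuel : Nat) (g : List (List String)), GShape g n L → fuel ≤ L →
      GShape (pvInner r n g fuel) n L ∧
      ∀ c, colOf (pvInner r n g fuel) c =
        if c < fuel then cstep n (colOf g c) r else colOf g c := by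
  intro fuel
  induction fuel with
  | zero =>
    intro g hg _
    exact ⟨hg, fun c => by simp [pvInner]⟩
  | succ c ih =>
    intro g hg hfuel
    have hc : c < L := by omega
    have hmid : GShape (if pvGet2 g r c = "#" then pvDrop (pvSet2 g r c "-") c (n-1) else g) n L ∧
        colOf (if pvGet2 g r c = "#" then pvDrop (pvSet2 g r c "-") c (n-1) else g) c
          = cstep n (colOf g c) r ∧
        ∀ c', c' ≠ c →
          colOf (if pvGet2 g r c = "#" then pvDrop (pvSet2 g r c "-") c (n-1) else g) c'
            = colOf g c' := by
      by_cases h : (colOf g c).getD r "" = "#"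
      · have hp : pvGet2 g r c = "#" := by rw [pvGet2_colOf]; exact h
        simp only [if_pos hp]
        have hset := shape_set2 g r c "-" hg
        obtain ⟨s1, s2, s3⟩ := pvDrop_bridge c L hc (n-1) _ hset
        refine ⟨s1, ?_, fun c' hne => by rw [s3 c' hne, colOf_set2_ne _ _ _ _ _ hne]⟩
        rw [s2, colOf_set2_self _ _ _ _ (set2_ok g hg c r hc), cstep, if_pos h]
      · have hp : ¬ pvGet2 g r c = "#" := by rw [pvGet2_colOf]; exact h
        simp only [if_neg hp]
        exact ⟨hg, by rw [cstep, if_neg h], fun _ _ => trivial⟩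
    obtain ⟨m1, m2, m3⟩ := hmid
    obtain ⟨r1, r2⟩ := ih _ m1 (by omega)
    refine ⟨by simpa only [pvInner] using r1, fun c' => ?_⟩
    have heq : colOf (pvInner r n g (c+1)) c'
        = colOf (pvInner r n (if pvGet2 g r c = "#" then pvDrop (pvSet2 g r c "-") c (n-1) else g) c) c' := rfl
    rw [heq, r2 c']
    by_cases h1 : c' < c
    · simp [h1, show c' < c + 1 by omega, m3 c' (by omega)]
    · by_cases h2 : c' = c
      · subst h2
        simp [h1, show c' < c' + 1 by omega, m2]
      · simp [h1, show ¬ c' < c + 1 by omega, m3 c' h2]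


theorem pvOuter_bridge (n L : Nat) :
    ∀ (fuel : Nat) (g : List (List String)), GShape g n L → fuel ≤ n →
      GShape (pvOuter n g fuel) n L ∧
      ∀ c, c < L → colOf (pvOuter n g fuel) c = couter n (colOf g c) fuel := by
  intro fuel
  induction fuel with
  | zero =>
    intro g hg _
    exact ⟨hg, fun c _ => by simp [pvOuter, couter]⟩
  | succ r ih =>
    intro g hg hfuel
    have hrow : (g.getD r []).length = L := by
      have hr : r < g.length := by rw [hg.1]; omega
      rw [List.getD_eq_getElem g [] hr]
      exact hg.2 _ (List.getElem_mem hr)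
    obtain ⟨m1, m2⟩ := pvInner_bridge r n L L g hg (le_refl L)
    obtain ⟨r1, r2⟩ := ih _ m1 (by omega)
    refine ⟨by simpa only [pvOuter, hrow] using r1, fun c hcL => ?_⟩
    have heq : colOf (pvOuter n g (r+1)) c = colOf (pvOuter n (pvInner r n g ((g.getD r []).length)) r) c := rfl
    rw [heq, hrow, r2 c hcL, m2 c, if_pos hcL]
    rfl

-- ---- column-level correctness of A ----
-- invariant: rows ≥ r already compacted w.r.t. the '#'-count of the original suffix
def CInv (xs ys : List String) (r : Nat) : Prop :=
  ys.length = xs.length ∧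
  (∀ i, i < r → ys.getD i "" = xs.getD i "") ∧
  (∀ i, r ≤ i → i < xs.length →
    ys.getD i "" =
      if xs.length - chash (xs.drop r) ≤ i then "#"
      else if xs.getD i "" = "#" then "-" else xs.getD i "")

theorem cdrop_eq (xs : List String) (m : Nat) (hx : xs.getD m "" ≠ "#") :
    ∀ lr, m ≤ lr → (∀ i, m < i → i ≤ lr → xs.getD i "" = "#") →
      cdrop xs lr = xs.set m "#" := by
  intro lr
  induction lr with
  | zero =>
    intro hm _
    have : m = 0 := by omega
    subst this
    rw [cdrop, if_pos hx]
  | succ lr ih =>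
    intro hm hall
    by_cases he : m = lr + 1
    · subst he
      rw [cdrop, if_pos hx]
    · have h1 : xs.getD (lr+1) "" = "#" := hall _ (by omega) (le_refl _)
      rw [cdrop, if_neg (by simpa using h1)]
      exact ih (by omega) (fun i h1 h2 => hall i h1 (by omega))


theorem cinv_init (xs : List String) : CInv xs xs (xs.length - 1) := by
  refine ⟨rfl, fun _ _ => rfl, fun i h1 h2 => ?_⟩
  have hi : i = xs.length - 1 := by omega
  subst hi
  have hlt : xs.length - 1 < xs.length := by omega
  rw [List.drop_eq_getElem_cons hlt, List.drop_eq_nil_of_le (by omega)]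
  rw [List.getD_eq_getElem xs "" hlt]
  by_cases h : xs[xs.length - 1] = "#" <;> simp [chash, h] <;> omega

theorem cstep_inv (xs ys : List String) (r : Nat) (hr : r + 1 ≤ xs.length - 1)
    (h : CInv xs ys (r+1)) : CInv xs (cstep xs.length ys r) r := by
  obtain ⟨hlen, hpre, hsuf⟩ := h
  have hrn : r + 1 < xs.length := by omega
  have hyr : ys.getD r "" = xs.getD r "" := hpre r (by omega)
  have hdrop : xs.drop r = xs.getD r "" :: xs.drop (r+1) := by
    rw [List.drop_eq_getElem_cons (by omega : r < xs.length), List.getD_eq_getElem xs "" (by omega)]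
  have hkbound : chash (xs.drop (r+1)) ≤ xs.length - (r+1) := by
    have := List.countP_le_length (p := fun v => decide (v = "#")) (l := xs.drop (r+1))
    simpa [chash] using this
  by_cases hx : xs.getD r "" = "#"
  · have hx' : xs[r]?.getD "" = "#" := by rw [← List.getD_eq_getElem?_getD]; exact hx
    have hkr : chash (xs.drop r) = chash (xs.drop (r+1)) + 1 := by
      rw [hdrop]; simp [chash, hx']
    have hcase : cstep xs.length ys r = cdrop (ys.set r "-") (xs.length - 1) := by
      rw [cstep, if_pos (by rw [hyr]; exact hx)]
    have hmr : r ≤ xs.length - chash (xs.drop (r+1)) - 1 := by omega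
    have hmn : xs.length - chash (xs.drop (r+1)) - 1 < xs.length := by omega
    have hget_set : ∀ i, i ≠ r → (ys.set r "-").getD i "" = ys.getD i "" := by
      intro i hi
      simp [List.getD_eq_getElem?_getD, List.getElem?_set_ne (by omega : r ≠ i)]
    have hget_r : (ys.set r "-").getD r "" = "-" := by
      simp [List.getD_eq_getElem?_getD, List.getElem?_set_self (by omega : r < ys.length)]
    have hdropeq : cdrop (ys.set r "-") (xs.length - 1)
        = (ys.set r "-").set (xs.length - chash (xs.drop (r+1)) - 1) "#" := by
      apply cdrop_eq
      · by_cases hmr' : xs.length - chash (xs.drop (r+1)) - 1 = r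
        · rw [hmr', hget_r]; intro hcon; exact absurd hcon (by decide)
        · rw [hget_set _ hmr']
          rw [hsuf _ (by omega) (by omega), if_neg (by omega)]
          intro hcon
          by_cases hxm : xs.getD (xs.length - chash (xs.drop (r+1)) - 1) "" = "#"
          · rw [if_pos hxm] at hcon; exact absurd hcon (by decide)
          · rw [if_neg hxm] at hcon; exact hxm hcon
      · omega
      · intro i h1 h2
        rw [hget_set i (by omega), hsuf i (by omega) (by omega), if_pos (by omega)]
    rw [hcase, hdropeq]
    have hgets : ∀ i, i ≠ xs.length - chash (xs.drop (r+1)) - 1 → i ≠ r →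
        (((ys.set r "-").set (xs.length - chash (xs.drop (r+1)) - 1) "#").getD i "") = ys.getD i "" := by
      intro i h1 h2
      simp [List.getD_eq_getElem?_getD, List.getElem?_set_ne (by omega : xs.length - chash (xs.drop (r+1)) - 1 ≠ i),
        List.getElem?_set_ne (by omega : r ≠ i)]
    refine ⟨by simp [hlen], fun i hi => ?_, fun i h1 h2 => ?_⟩
    · rw [hgets i (by omega) (by omega)]
      exact hpre i (by omega)
    · rw [hkr]
      by_cases him : i = xs.length - chash (xs.drop (r+1)) - 1
      · subst him
        have hcond : xs.length - (chash (List.drop (r+1) xs) + 1)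
            ≤ xs.length - chash (List.drop (r+1) xs) - 1 := by omega
        rw [List.getD_eq_getElem?_getD, List.getElem?_set_self (by simp; omega), if_pos hcond]
        simp
      · by_cases hir : i = r
        · subst hir
          have hcond : ¬ (xs.length - (chash (List.drop (i+1) xs) + 1) ≤ i) := by omega
          rw [List.getD_eq_getElem?_getD, List.getElem?_set_ne (by omega),
            ← List.getD_eq_getElem?_getD, hget_r, if_neg hcond, if_pos hx]
        · rw [hgets i him hir, hsuf i (by omega) (by omega)]
          by_cases hbig : xs.length - chash (xs.drop (r+1)) ≤ i
          · have hcond : xs.length - (chash (List.drop (r+1) xs) + 1) ≤ i := by omega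
            rw [if_pos hbig, if_pos hcond]
          · have hcond : ¬ (xs.length - (chash (List.drop (r+1) xs) + 1) ≤ i) := by omega
            rw [if_neg hbig, if_neg hcond]
  · have hx' : ¬ xs[r]?.getD "" = "#" := by rw [← List.getD_eq_getElem?_getD]; exact hx
    have hkr : chash (xs.drop r) = chash (xs.drop (r+1)) := by
      rw [hdrop]; simp [chash, hx']
    have hcase : cstep xs.length ys r = ys := by
      rw [cstep, if_neg (by rw [hyr]; exact hx)]
    rw [hcase]
    refine ⟨hlen, fun i hi => hpre i (by omega), fun i h1 h2 => ?_⟩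
    rw [hkr]
    by_cases hir : i = r
    · subst hir
      have hcond : ¬ (xs.length - chash (List.drop (i+1) xs) ≤ i) := by omega
      rw [hyr, if_neg hcond, if_neg hx]
    · exact hsuf i (by omega) h2


theorem couter_inv (xs : List String) :
    ∀ (fuel : Nat) (ys : List String), fuel ≤ xs.length - 1 → CInv xs ys fuel →
      CInv xs (couter xs.length ys fuel) 0 := by
  intro fuel
  induction fuel with
  | zero => intro ys _ h; exact h
  | succ r ih =>
    intro ys hfuel h
    rw [couter]
    exact ih _ (by omega) (cstep_inv xs ys r hfuel h)


theorem couter_spec (xs : List String) :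
    couter xs.length xs (xs.length - 1) = cspec xs := by
  rcases Nat.eq_zero_or_pos xs.length with h0 | hpos
  · have : xs = [] := List.eq_nil_of_length_eq_zero h0
    subst this
    simp [couter, cspec]
  · obtain ⟨hlen, _, hsuf⟩ := couter_inv xs (xs.length - 1) xs (le_refl _) (cinv_init xs)
    apply List.ext_getElem (by simp [cspec, hlen])
    intro i hi1 hi2
    have hin : i < xs.length := by omega
    rw [← List.getD_eq_getElem _ "" hi1, hsuf i (by omega) hin]
    rw [List.drop_zero]
    simp only [cspec, List.getElem_mapIdx]
    rw [List.getD_eq_getElem xs "" hin]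

-- ---- B side ----
theorem map_getD_range (xs : List String) :
    (List.range xs.length).map (fun r => xs.getD r "") = xs := by
  apply List.ext_getElem (by simp)
  intro i h1 h2
  simp only [List.getElem_map, List.getElem_range, List.getD_eq_getElem?_getD,
    List.getElem?_eq_getElem h2, Option.getD_some]

theorem countP_range_chash (xs : List String) :
    (List.range xs.length).countP (fun r => decide (xs.getD r "" = "#")) = chash xs := by
  conv_rhs => rw [chash, ← map_getD_range xs]
  rw [List.countP_map]
  rfl

-- the fill loop, at column level: processes rows 0..j-1
theorem cfill_take (xs : List String) (k : Nat) (hk : k = chash xs) :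
    ∀ j, j ≤ xs.length →
      (List.range j).foldl
        (fun ys r => if xs.length - k ≤ r then ys.set r "#"
          else if ys.getD r "" = "#" then ys.set r "-" else ys) xs
      = (cspec xs).take j ++ xs.drop j := by
  intro j
  induction j with
  | zero => simp
  | succ j ih =>
    intro hj
    have hjn : j < xs.length := by omega
    have hclen : (cspec xs).length = xs.length := by simp [cspec]
    have htlen : ((cspec xs).take j).length = j := by simp; omega
    have hxj : xs.getD j "" = xs[j]'hjn := List.getD_eq_getElem xs "" hjn
    have hdropj : xs.drop j = xs[j]'hjn :: xs.drop (j+1) := List.drop_eq_getElem_cons hjn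
    rw [List.range_succ, List.foldl_append, ih (by omega)]
    simp only [List.foldl_cons, List.foldl_nil]
    have hget : ((cspec xs).take j ++ xs.drop j).getD j "" = xs.getD j "" := by
      rw [List.getD_append_right _ _ _ _ (by omega), htlen, Nat.sub_self, hdropj]
      rw [List.getD_cons_zero, hxj]
    have hcj : (cspec xs)[j]'(by omega) =
        if xs.length - chash xs ≤ j then "#" else if xs[j]'hjn = "#" then "-" else xs[j]'hjn := by
      simp [cspec, List.getElem_mapIdx]
    have htsucc : (cspec xs).take (j+1) = (cspec xs).take j ++ [(cspec xs)[j]'(by omega)] :=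
      List.take_succ_eq_append_getElem (by omega)
    have hset : ∀ v, ((cspec xs).take j ++ xs.drop j).set j v
        = (cspec xs).take j ++ v :: xs.drop (j+1) := by
      intro v
      rw [List.set_append, if_neg (by omega), htlen, Nat.sub_self, hdropj, List.set_cons_zero]
    by_cases h1 : xs.length - k ≤ j
    · rw [if_pos h1, hset, htsucc, hcj, if_pos (by rw [← hk]; exact h1)]
      simp
    · rw [if_neg h1]
      by_cases h2 : xs.getD j "" = "#"
      · rw [if_pos (by rw [hget]; exact h2), hset, htsucc, hcj,
          if_neg (by rw [← hk]; exact h1), if_pos (by rw [← hxj]; exact h2)]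
        simp
      · rw [if_neg (by rw [hget]; exact h2), htsucc, hcj,
          if_neg (by rw [← hk]; exact h1), if_neg (by rw [← hxj]; exact h2), hdropj]
        simp

-- the fill fold, grid level ↔ column level (k is the precomputed count)
theorem colFold_bridge (n L c k : Nat) (hc : c < L) :
    ∀ (rs : List Nat) (g : List (List String)), GShape g n L →
      GShape (rs.foldl (fun h r =>
        if n - k ≤ r then pvSet2 h r c "#"
        else if pvGet2 h r c = "#" then pvSet2 h r c "-" else h) g) n L ∧
      colOf (rs.foldl (fun h r =>
        if n - k ≤ r then pvSet2 h r c "#"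
        else if pvGet2 h r c = "#" then pvSet2 h r c "-" else h) g) c
        = rs.foldl (fun ys r =>
            if n - k ≤ r then ys.set r "#"
            else if ys.getD r "" = "#" then ys.set r "-" else ys) (colOf g c) ∧
      ∀ c', c' ≠ c → colOf (rs.foldl (fun h r =>
        if n - k ≤ r then pvSet2 h r c "#"
        else if pvGet2 h r c = "#" then pvSet2 h r c "-" else h) g) c' = colOf g c' := by
  intro rs
  induction rs with
  | nil => exact fun g hg => ⟨hg, rfl, fun _ _ => rfl⟩
  | cons r rs ih =>
    intro g hg
    simp only [List.foldl_cons]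
    have hmid : GShape (if n - k ≤ r then pvSet2 g r c "#"
          else if pvGet2 g r c = "#" then pvSet2 g r c "-" else g) n L ∧
        colOf (if n - k ≤ r then pvSet2 g r c "#"
          else if pvGet2 g r c = "#" then pvSet2 g r c "-" else g) c
          = (if n - k ≤ r then (colOf g c).set r "#"
            else if (colOf g c).getD r "" = "#" then (colOf g c).set r "-" else colOf g c) ∧
        ∀ c', c' ≠ c → colOf (if n - k ≤ r then pvSet2 g r c "#"
          else if pvGet2 g r c = "#" then pvSet2 g r c "-" else g) c' = colOf g c' := by
      by_cases h1 : n - k ≤ r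
      · simp only [if_pos h1]
        exact ⟨shape_set2 _ _ _ _ hg, colOf_set2_self _ _ _ _ (set2_ok g hg c r hc),
          fun c' hne => colOf_set2_ne _ _ _ _ _ hne⟩
      · simp only [if_neg h1]
        by_cases h2 : (colOf g c).getD r "" = "#"
        · have hp : pvGet2 g r c = "#" := by rw [pvGet2_colOf]; exact h2
          simp only [if_pos hp, if_pos h2]
          exact ⟨shape_set2 _ _ _ _ hg, colOf_set2_self _ _ _ _ (set2_ok g hg c r hc),
            fun c' hne => colOf_set2_ne _ _ _ _ _ hne⟩
        · have hp : ¬ pvGet2 g r c = "#" := by rw [pvGet2_colOf]; exact h2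
          simp only [if_neg hp, if_neg h2]
          exact ⟨hg, trivial, fun _ _ => trivial⟩
    obtain ⟨m1, m2, m3⟩ := hmid
    obtain ⟨r1, r2, r3⟩ := ih _ m1
    exact ⟨r1, by rw [r2, m2], fun c' hne => by rw [r3 c' hne, m3 c' hne]⟩

theorem pvColFix_bridge (n L c : Nat) (g : List (List String)) (hg : GShape g n L) (hc : c < L) :
    GShape (pvColFix n g c) n L ∧
    (∀ c', c' ≠ c → colOf (pvColFix n g c) c' = colOf g c') ∧
    (n = g.length → colOf (pvColFix n g c) c = cspec (colOf g c)) := by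
  obtain ⟨f1, f2, f3⟩ := colFold_bridge n L c
    ((List.range n).countP (fun r => pvGet2 g r c = "#")) hc (List.range n) g hg
  refine ⟨f1, fun c' hne => f3 c' hne, fun hn => ?_⟩
  have hk : (List.range n).countP (fun r => pvGet2 g r c = "#") = chash (colOf g c) := by
    have hlen : n = (colOf g c).length := by rw [length_colOf, ← hn]
    rw [← countP_range_chash (colOf g c), ← hlen]
    apply List.countP_congr
    intro r _
    rw [pvGet2_colOf]
  have hnlen : n = (colOf g c).length := by rw [length_colOf, ← hn]
  show colOf ((List.range n).foldl
      (fun h r => if n - (List.range n).countP (fun r => pvGet2 g r c = "#") ≤ r then pvSet2 h r c "#"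
        else if pvGet2 h r c = "#" then pvSet2 h r c "-" else h) g) c = cspec (colOf g c)
  rw [f2, hk, hnlen,
    cfill_take (colOf g c) (chash (colOf g c)) rfl (colOf g c).length (le_refl _),
    List.drop_length, List.append_nil, List.take_of_length_le (by simp [cspec])]

theorem alt_spec (lst : List (List String)) {n L : Nat} (hg : GShape lst n L) :
    GShape (switch_gravity_on_alt lst) n L ∧
    ∀ c, c < L → colOf (switch_gravity_on_alt lst) c = cspec (colOf lst c) := by
  by_cases hnil : lst = []
  · subst hnil
    rw [switch_gravity_on_alt, if_pos rfl]
    refine ⟨hg, fun c _ => ?_⟩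
    simp [colOf, cspec]
  · have hL : (lst.getD 0 []).length = L := by
      have h0 : 0 < lst.length := List.length_pos_of_ne_nil hnil
      rw [List.getD_eq_getElem lst [] h0]
      exact hg.2 _ (List.getElem_mem h0)
    rw [switch_gravity_on_alt, if_neg hnil, hL]
    have hn : n = lst.length := hg.1.symm
    have main : ∀ j, j ≤ L →
        GShape ((List.range j).foldl (pvColFix lst.length) lst) n L ∧
        ∀ c, c < L → colOf ((List.range j).foldl (pvColFix lst.length) lst) c
          = if c < j then cspec (colOf lst c) else colOf lst c := by
      intro j
      induction j with
      | zero => exact fun _ => ⟨hg, fun c _ => by simp⟩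
      | succ j ih =>
        intro hj
        obtain ⟨p1, p2⟩ := ih (by omega)
        rw [List.range_succ, List.foldl_append, List.foldl_cons, List.foldl_nil]
        obtain ⟨q1, q2, q3⟩ := pvColFix_bridge lst.length L j _
          ⟨p1.1.trans hn, p1.2⟩ (by omega)
        refine ⟨⟨q1.1.trans hn.symm, q1.2⟩, fun c hcL => ?_⟩
        by_cases hcj : c = j
        · subst hcj
          rw [q3 (hn.symm.trans p1.1.symm), p2 c hcL, if_neg (by omega), if_pos (by omega)]
        · rw [q2 c hcj, p2 c hcL]
          by_cases hlt : c < j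
          · rw [if_pos hlt, if_pos (by omega)]
          · rw [if_neg hlt, if_neg (by omega)]
    obtain ⟨m1, m2⟩ := main L (le_refl L)
    exact ⟨m1, fun c hc => by rw [m2 c hc, if_pos hc]⟩

-- grids with the same rectangular shape and the same columns are equal
theorem grid_ext (g1 g2 : List (List String)) {n L : Nat}
    (h1 : GShape g1 n L) (h2 : GShape g2 n L)
    (hcol : ∀ c, c < L → colOf g1 c = colOf g2 c) : g1 = g2 := by
  apply List.ext_getElem (by rw [h1.1, h2.1])
  intro r hr1 hr2
  have hl1 : (g1[r]'hr1).length = L := h1.2 _ (List.getElem_mem hr1)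
  have hl2 : (g2[r]'hr2).length = L := h2.2 _ (List.getElem_mem hr2)
  apply List.ext_getElem (by rw [hl1, hl2])
  intro c hc1 hc2
  have hcL : c < L := by omega
  have e1 : (colOf g1 c)[r]'(by simpa [length_colOf]) = (g1[r]'hr1).getD c "" := by
    simp [colOf]
  have e2 : (colOf g2 c)[r]'(by simpa [length_colOf]) = (g2[r]'hr2).getD c "" := by
    simp [colOf]
  have := hcol c hcL
  rw [List.getD_eq_getElem _ "" hc1] at e1
  rw [List.getD_eq_getElem _ "" hc2] at e2
  rw [← e1, ← e2]
  exact List.getElem_of_eq (hcol c hcL) _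

-- ---- the ragged-but-trivial disjunct: both programs return the grid unchanged ----
theorem getD_col_ne_hash (row : List String) (hm : "#" ∉ row) (c : Nat) :
    row.getD c "" ≠ "#" := by
  by_cases hc : c < row.length
  · rw [List.getD_eq_getElem row "" hc]
    intro h
    exact hm (h ▸ List.getElem_mem hc)
  · rw [List.getD_eq_getElem?_getD, List.getElem?_eq_none (by omega)]
    decide

theorem A_trivial (lst : List (List String))
    (h : ∀ i < lst.length - 1, "#" ∉ lst.getD i []) : switch_gravity_on lst = lst := by
  have inner : ∀ r, r < lst.length - 1 → ∀ cf, pvInner r lst.length lst cf = lst := by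
    intro r hr cf
    induction cf with
    | zero => rfl
    | succ c ih =>
      have hne : pvGet2 lst r c ≠ "#" := getD_col_ne_hash _ (h r hr) c
      show pvInner r lst.length
        (if pvGet2 lst r c = "#" then pvDrop (pvSet2 lst r c "-") c (lst.length-1) else lst) c = lst
      rw [if_neg hne]
      exact ih
  show pvOuter lst.length lst (lst.length - 1) = lst
  have outer : ∀ fuel, fuel ≤ lst.length - 1 → pvOuter lst.length lst fuel = lst := by
    intro fuel
    induction fuel with
    | zero => intro _; rfl
    | succ r ih =>
      intro hfuel
      show pvOuter lst.length (pvInner r lst.length lst ((lst.getD r []).length)) r = lst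
      rw [inner r (by omega) _]
      exact ih (by omega)
  exact outer _ (le_refl _)

theorem pvSet2_self (g : List (List String)) (i c : Nat) (hi : i < g.length)
    (hc : c < (g.getD i []).length) : pvSet2 g i c (pvGet2 g i c) = g := by
  rw [pvSet2, pvGet2, List.getD_eq_getElem g [] hi,
    List.getD_eq_getElem _ "" (by rwa [List.getD_eq_getElem g [] hi] at hc),
    List.set_getElem_self, List.set_getElem_self]

theorem foldl_fixed {α β : Type} (f : α → β → α) (a : α) :
    ∀ rs : List β, (∀ r ∈ rs, f a r = a) → rs.foldl f a = a := by
  intro rs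
  induction rs with
  | nil => intro _; rfl
  | cons r rs ih =>
    intro h
    rw [List.foldl_cons, h r List.mem_cons_self]
    exact ih (fun x hx => h x (List.mem_cons_of_mem r hx))

theorem B_trivial (lst : List (List String))
    (hmin : ∀ row ∈ lst, (lst.headD []).length ≤ row.length)
    (h : ∀ i < lst.length - 1, "#" ∉ lst.getD i []) : switch_gravity_on_alt lst = lst := by
  by_cases hnil : lst = []
  · rw [switch_gravity_on_alt, if_pos hnil]
  · have hn1 : 0 < lst.length := List.length_pos_of_ne_nil hnil
    have hhead : lst.headD [] = lst.getD 0 [] := by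
      cases lst with
      | nil => rfl
      | cons a l => rfl
    rw [switch_gravity_on_alt, if_neg hnil]
    apply foldl_fixed
    intro c hcm
    have hc : c < (lst.getD 0 []).length := List.mem_range.mp hcm
    have hrowlen : ∀ r, r < lst.length → c < (lst.getD r []).length := by
      intro r hr
      have hm : lst.getD r [] ∈ lst := by
        rw [List.getD_eq_getElem lst [] hr]
        exact List.getElem_mem hr
      have := hmin _ hm
      rw [hhead] at this
      omega
    have hup : ∀ r, r < lst.length - 1 → pvGet2 lst r c ≠ "#" :=
      fun r hr => getD_col_ne_hash _ (h r hr) c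
    have hk : (List.range lst.length).countP (fun r => pvGet2 lst r c = "#")
        = if pvGet2 lst (lst.length - 1) c = "#" then 1 else 0 := by
      rw [show lst.length = (lst.length - 1) + 1 by omega, List.range_succ, List.countP_append]
      rw [List.countP_eq_zero.mpr (by
        intro r hr
        simp only [decide_eq_true_eq]
        exact hup r (List.mem_range.mp hr))]
      simp [Nat.zero_add]
    show (List.range lst.length).foldl (fun h r =>
      if lst.length - (List.range lst.length).countP (fun r => pvGet2 lst r c = "#") ≤ r
      then pvSet2 h r c "#"
      else if pvGet2 h r c = "#" then pvSet2 h r c "-" else h) lst = lst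
    apply foldl_fixed
    intro r hrm
    have hr : r < lst.length := List.mem_range.mp hrm
    rw [hk]
    by_cases hlast : r = lst.length - 1
    · subst hlast
      by_cases hb : pvGet2 lst (lst.length - 1) c = "#"
      · rw [if_pos hb, if_pos (by omega), ← hb]
        exact pvSet2_self lst _ c (by omega) (hrowlen _ (by omega))
      · rw [if_neg (by rw [if_neg hb]; omega), if_neg hb]
    · have hr1 : r < lst.length - 1 := by omega
      rw [if_neg (by split <;> omega), if_neg (hup r hr1)]

-- ===== VERDICT (by name: the statement is the Claim_ definition above) =====
theorem switch_gravity_on_spec : Claim_equal_switch_gravity_on := by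
  intro lst _ hpre
  show switch_gravity_on lst = switch_gravity_on_alt lst
  rcases hpre with hrect | ⟨hmin, hno⟩
  · have hshape : GShape lst lst.length (lst.headD []).length := ⟨rfl, hrect⟩
    obtain ⟨ha1, ha2⟩ := pvOuter_bridge lst.length (lst.headD []).length
      (lst.length - 1) lst hshape (by omega)
    obtain ⟨hb1, hb2⟩ := alt_spec lst hshape
    apply grid_ext _ _ ha1 hb1
    intro c hc
    rw [ha2 c hc, hb2 c hc]
    have := couter_spec (colOf lst c)
    rwa [length_colOf] at this
  · rw [A_trivial lst hno, B_trivial lst hmin hno]
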